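-- pv_equiv track=rewrite | github.com/Gyeong-Hyeon/coding_test | vroong_2227/q1.py | findSubstrings
-- ===== SOURCE A (Python) =====
-- def findSubstrings(s):
--     cnt = len(s)
--     for i in range(2, len(s)+1):
--         for j in range(len(s)-i+1):
--             ss = set(s[j:j+i])
--             if len(ss) != i:
--                 continue
--             cnt+=1
--
--     return cnt
-- ===== SOURCE B (Python) =====
-- def findSubstrings(s):
--     # For each start j, greedily extend while characters stay distinct;
--     # the number of duplicate-free substrings starting at j is the length
--     # of the longest duplicate-free prefix of s[j:].  Sum over j.
--     total = 0
--     for j in range(len(s)):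
--         seen = set()
--         for c in s[j:]:
--             if c in seen:
--                 break
--             seen.add(c)
--         total += len(seen)
--     return total
-- ===== Notes on version B (the rewrite author's own statement) =====
-- stated objective: faster
-- what changed: Instead of enumerating every (length, start) pair and building a set for each substring, B scans once from each start position, greedily extending while characters stay distinct (the inner scan stops after at most alphabet-size steps), and sums the greedy window lengths.
import Mathlib
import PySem

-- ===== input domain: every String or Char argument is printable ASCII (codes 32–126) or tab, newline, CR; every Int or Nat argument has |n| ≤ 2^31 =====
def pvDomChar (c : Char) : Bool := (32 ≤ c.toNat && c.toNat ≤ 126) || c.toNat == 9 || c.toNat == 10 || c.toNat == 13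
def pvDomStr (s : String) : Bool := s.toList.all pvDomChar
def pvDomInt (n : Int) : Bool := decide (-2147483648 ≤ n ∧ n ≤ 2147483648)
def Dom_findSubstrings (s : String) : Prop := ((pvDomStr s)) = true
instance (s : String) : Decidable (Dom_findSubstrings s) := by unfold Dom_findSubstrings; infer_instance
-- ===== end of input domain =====

-- B replaces A's cubic (length, start) substring enumeration by a greedy distinct-prefix
-- scan from each start position (objective: faster; asymptotic, O(n^3) -> O(n*alphabet)).


-- ===== PORT A =====
-- cnt = len(s); for i in range(2, len(s)+1): for j in range(len(s)-i+1):
--   ss = set(s[j:j+i]); if len(ss) != i: continue; cnt += 1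
def findSubstrings (s : String) : Int :=
  let l := s.toList
  let n : Int := (l.length : Int)
  (PySem.List.pyRange 2 (n + 1) 1).foldl (fun cnt i =>
    (PySem.List.pyRange 0 (n - i + 1) 1).foldl (fun cnt j =>
      let ss : PySem.Set Char := PySem.Set.ofList (PySem.List.slice l (some j) (some (j + i)))
      if (ss.length : Int) ≠ i then cnt else cnt + 1) cnt) n

-- ===== PORT B =====
-- inner loop 'for c in s[j:]: if c in seen: break; seen.add(c)'
def pvScan : List Char → PySem.Set Char → PySem.Set Char
  | [], seen => seen
  | c :: rest, seen => if PySem.Set.contains seen c then seen else pvScan rest (PySem.Set.add seen c)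

def findSubstrings_alt (s : String) : Int :=
  let l := s.toList
  (PySem.List.pyRange 0 (l.length : Int) 1).foldl
    (fun total j =>
      total + ((pvScan (PySem.List.slice l (some j) none) PySem.Set.empty).length : Int)) 0

-- ===== PRECONDITION & SPEC =====
def Spec_findSubstrings (s : String) (out : Int) : Prop := out = findSubstrings_alt s
instance (s : String) (out : Int) : Decidable (Spec_findSubstrings s out) := by unfold Spec_findSubstrings; infer_instance

-- ===== CLAIM (what is proved, stated in full; the proofs are below) =====
def Claim_equal_findSubstrings : Prop := ∀ (s : String), Dom_findSubstrings s → Spec_findSubstrings s (findSubstrings s)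

-- ===== LEMMAS AND PROOFS =====

-- F xs = length of the longest duplicate-free prefix of xs, as computed by B's inner loop
def pvF (xs : List Char) : Nat := (pvScan xs PySem.Set.empty).length

lemma pvScan_spec : ∀ (xs : List Char) (seen : List Char), seen.Nodup →
    ∃ k, k ≤ xs.length ∧ pvScan xs seen = seen ++ xs.take k ∧ (seen ++ xs.take k).Nodup ∧
      (∀ h : k < xs.length, xs[k] ∈ seen ++ xs.take k) := by
  intro xs
  induction xs with
  | nil =>
    intro seen hs
    exact ⟨0, by simp [pvScan, hs]⟩
  | cons c rest ih =>
    intro seen hs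
    by_cases hc : c ∈ seen
    · refine ⟨0, by simp, ?_, by simpa using hs, ?_⟩
      · simp [pvScan, hc]
      · intro _; simpa using hc
    · have hstep : pvScan (c :: rest) seen = pvScan rest (seen ++ [c]) := by
        simp [pvScan, hc]
      have hs' : (seen ++ [c]).Nodup := by
        simp only [List.nodup_append, List.nodup_cons]
        exact ⟨hs, by simp, fun a ha => by simp; rintro rfl; exact hc ha⟩
      obtain ⟨k, hk, heq, hnd, hnext⟩ := ih (seen ++ [c]) hs'
      refine ⟨k + 1, by simpa using Nat.succ_le_succ hk, ?_, ?_, ?_⟩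
      · rw [hstep, heq]; simp [List.take_succ_cons]
      · simpa [List.take_succ_cons] using hnd
      · intro h
        have := hnext (by simpa using Nat.lt_of_succ_lt_succ h)
        simpa [List.take_succ_cons] using this

lemma pvF_spec (xs : List Char) :
    pvF xs ≤ xs.length ∧ pvScan xs PySem.Set.empty = xs.take (pvF xs) ∧
      (xs.take (pvF xs)).Nodup ∧ (∀ h : pvF xs < xs.length, xs[pvF xs] ∈ xs.take (pvF xs)) := by
  obtain ⟨k, hk, heq, hnd, hnext⟩ := pvScan_spec xs [] List.nodup_nil
  simp only [List.nil_append] at heq hnd hnext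
  have hF : pvF xs = k := by
    unfold pvF
    show (pvScan xs []).length = k
    rw [heq, List.length_take]
    omega
  rw [hF]
  exact ⟨hk, heq, hnd, hnext⟩

lemma pvF_le (xs : List Char) : pvF xs ≤ xs.length := (pvF_spec xs).1

lemma pvF_pos (xs : List Char) (h : xs ≠ []) : 1 ≤ pvF xs := by
  obtain ⟨hle, heq, hnd, hnext⟩ := pvF_spec xs
  by_contra hlt
  have h0 : pvF xs = 0 := by omega
  have hlen : 0 < xs.length := List.length_pos_of_ne_nil h
  have hmem := hnext (by omega)
  simp [h0] at hmem

lemma pvF_nodup_iff (xs : List Char) (i : Nat) (hi : i ≤ xs.length) :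
    (xs.take i).Nodup ↔ i ≤ pvF xs := by
  obtain ⟨hle, heq, hnd, hnext⟩ := pvF_spec xs
  constructor
  · intro hnodup
    by_contra hgt
    have hklt : pvF xs < i := by omega
    have hkx : pvF xs < xs.length := by omega
    have hmem := hnext hkx
    have htk : xs.take (pvF xs + 1) = xs.take (pvF xs) ++ [xs[pvF xs]] := by
      rw [List.take_add_one, List.getElem?_eq_getElem hkx]
      rfl
    have hnot : ¬ (xs.take (pvF xs + 1)).Nodup := by
      rw [htk]
      intro hnd2
      rcases List.nodup_append.mp hnd2 with ⟨-, -, hdisj⟩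
      exact hdisj _ hmem _ (by simp) rfl
    apply hnot
    have hsub : (xs.take (pvF xs + 1)).Sublist (xs.take i) := by
      have : xs.take (pvF xs + 1) = (xs.take i).take (pvF xs + 1) := by
        rw [List.take_take]
        congr 1
        omega
      rw [this]
      exact List.take_sublist _ _
    exact hnodup.sublist hsub
  · intro hik
    have : xs.take i = (xs.take (pvF xs)).take i := by
      rw [List.take_take]
      congr 1
      omega
    rw [this]
    exact hnd.sublist (List.take_sublist _ _)

-- ofList keeps a sublist, so equal length means no duplicate was dropped
lemma ofList_sublist (xs : List Char) : (PySem.Set.ofList xs).Sublist xs := by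
  induction xs using List.reverseRecOn with
  | nil => simp [PySem.Set.ofList_nil]
  | append_singleton ys y ih =>
    rw [PySem.Set.ofList_append_singleton, PySem.Set.add_eq_ite]
    split
    · exact ih.trans (List.sublist_append_left ys [y])
    · exact ih.append (List.Sublist.refl [y])

lemma ofList_length_iff (xs : List Char) :
    (PySem.Set.ofList xs).length = xs.length ↔ xs.Nodup := by
  constructor
  · intro h
    have heq : PySem.Set.ofList xs = xs := (ofList_sublist xs).eq_of_length h
    rw [← heq]
    exact PySem.Set.nodup_ofList xs
  · intro h
    rw [PySem.Set.ofList_eq_self_of_nodup xs h]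

-- the counting identity: A's double count equals B's sum of greedy window lengths
lemma count_lemma (l : List Char) :
    l.length + ∑ k ∈ Finset.range (l.length - 1),
        ((Finset.range (l.length - k - 1)).filter (fun m => ((l.drop m).take (k + 2)).Nodup)).card
      = ∑ j ∈ Finset.range l.length, pvF (l.drop j) := by
  set n := l.length with hn
  have hF_le : ∀ j, pvF (l.drop j) ≤ n - j := by
    intro j
    have := pvF_le (l.drop j)
    simpa using this
  have hF_pos : ∀ j < n, 1 ≤ pvF (l.drop j) := by
    intro j hj
    apply pvF_pos
    intro hnil
    have := congrArg List.length hnil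
    simp at this
    omega
  -- step a: rewrite each inner filter as a filter over range n of (k+2 ≤ pvF)
  have hstep_a : ∀ k ∈ Finset.range (n - 1),
      ((Finset.range (n - k - 1)).filter (fun m => ((l.drop m).take (k + 2)).Nodup)).card
        = ((Finset.range n).filter (fun m => k + 2 ≤ pvF (l.drop m))).card := by
    intro k hk
    rw [Finset.mem_range] at hk
    congr 1
    apply Finset.ext
    intro m
    simp only [Finset.mem_filter, Finset.mem_range]
    constructor
    · rintro ⟨hm, hnd⟩
      have hlen : k + 2 ≤ (l.drop m).length := by simp; omega
      have := (pvF_nodup_iff (l.drop m) (k + 2) hlen).1 hnd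
      exact ⟨by omega, this⟩
    · rintro ⟨hm, hF⟩
      have h1 := hF_le m
      have hlen : k + 2 ≤ (l.drop m).length := by
        simp
        omega
      exact ⟨by omega, (pvF_nodup_iff (l.drop m) (k + 2) hlen).2 hF⟩
  rw [Finset.sum_congr rfl hstep_a]
  -- step b: swap the two sums
  have hswap : ∑ k ∈ Finset.range (n - 1),
      ((Finset.range n).filter (fun m => k + 2 ≤ pvF (l.drop m))).card
      = ∑ m ∈ Finset.range n, (pvF (l.drop m) - 1) := by
    have h1 : ∀ k ∈ Finset.range (n - 1),
        ((Finset.range n).filter (fun m => k + 2 ≤ pvF (l.drop m))).card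
          = ∑ m ∈ Finset.range n, (if k + 2 ≤ pvF (l.drop m) then 1 else 0) := by
      intro k _
      rw [Finset.card_filter]
    rw [Finset.sum_congr rfl h1, Finset.sum_comm]
    apply Finset.sum_congr rfl
    intro m hm
    rw [Finset.mem_range] at hm
    have hle := hF_le m
    have hpos := hF_pos m hm
    have h2 : ∑ k ∈ Finset.range (n - 1), (if k + 2 ≤ pvF (l.drop m) then 1 else 0)
        = ((Finset.range (n - 1)).filter (fun k => k + 2 ≤ pvF (l.drop m))).card := by
      rw [Finset.card_filter]
    rw [h2]
    have h3 : (Finset.range (n - 1)).filter (fun k => k + 2 ≤ pvF (l.drop m))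
        = Finset.range (pvF (l.drop m) - 1) := by
      apply Finset.ext
      intro k
      simp only [Finset.mem_filter, Finset.mem_range]
      omega
    rw [h3, Finset.card_range]
  rw [hswap]
  have h5 : ∑ j ∈ Finset.range n, pvF (l.drop j)
      = ∑ j ∈ Finset.range n, (1 + (pvF (l.drop j) - 1)) := by
    apply Finset.sum_congr rfl
    intro m hm
    have := hF_pos m (Finset.mem_range.1 hm)
    omega
  rw [h5, Finset.sum_add_distrib]
  simp

-- bridge: List.range countP as Finset card
lemma countP_range (N : Nat) (p : Nat → Bool) :
    (List.range N).countP p = ((Finset.range N).filter (fun j => p j = true)).card := by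
  induction N with
  | zero => simp
  | succ m ih =>
    rw [List.range_succ, List.countP_append, ih, Finset.range_add_one,
      Finset.filter_insert]
    split
    · rw [Finset.card_insert_of_notMem (by simp)]
      simp [*]
    · simp [*]

lemma sum_range_cast (N : Nat) (f : Nat → Nat) :
    ((List.range N).map (fun k => ((f k : Nat) : Int))).sum = ((∑ j ∈ Finset.range N, f j : Nat) : Int) := by
  induction N with
  | zero => simp
  | succ m ih =>
    rw [List.range_succ, List.map_append, List.sum_append, ih, Finset.sum_range_succ]
    push_cast
    simp

lemma portB_eval (s : String) :
    findSubstrings_alt s = ((∑ j ∈ Finset.range s.toList.length, pvF (s.toList.drop j) : Nat) : Int) := by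
  unfold findSubstrings_alt
  rw [PySem.List.foldl_add _ (fun j =>
        ((pvScan (PySem.List.slice s.toList (some j) none) PySem.Set.empty).length : Int)),
    PySem.List.pyRange_one, List.map_map]
  have h1 : ((s.toList.length : Int) - 0).toNat = s.toList.length := by omega
  rw [h1]
  have h2 : (List.range s.toList.length).map
        ((fun j => ((pvScan (PySem.List.slice s.toList (some j) none) PySem.Set.empty).length : Int))
          ∘ (fun k : Nat => (0 : Int) + k))
      = (List.range s.toList.length).map (fun k => ((pvF (s.toList.drop k) : Nat) : Int)) := by
    apply List.map_congr_left
    intro k _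
    simp only [Function.comp, Int.zero_add, PySem.List.slice_from_natCast]
    rfl
  rw [h2, sum_range_cast]
  omega

lemma portA_eval (s : String) :
    findSubstrings s = ((s.toList.length + ∑ k ∈ Finset.range (s.toList.length - 1),
        ((Finset.range (s.toList.length - k - 1)).filter
          (fun m => ((s.toList.drop m).take (k + 2)).Nodup)).card : Nat) : Int) := by
  unfold findSubstrings
  set l := s.toList with hl
  set n := l.length with hn
  simp only [ne_eq, ite_not]
  have hbody : ∀ (cnt i : Int),
      (PySem.List.pyRange 0 ((n : Int) - i + 1) 1).foldl (fun cnt j =>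
        if (((PySem.Set.ofList (PySem.List.slice l (some j) (some (j + i)))).length : Int) = i)
        then cnt + 1 else cnt) cnt
      = cnt + ((PySem.List.pyRange 0 ((n : Int) - i + 1) 1).countP
          (fun j => decide (((PySem.Set.ofList (PySem.List.slice l (some j) (some (j + i)))).length : Int) = i)) : Int) := by
    intro cnt i
    rw [PySem.List.foldl_ite_add_one]
  rw [funext (fun cnt => funext (fun i => hbody cnt i))]
  rw [PySem.List.foldl_add _ (fun i =>
      ((PySem.List.pyRange 0 ((n : Int) - i + 1) 1).countP
        (fun j => decide (((PySem.Set.ofList (PySem.List.slice l (some j) (some (j + i)))).length : Int) = i)) : Int))]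
  rw [PySem.List.pyRange_one, List.map_map]
  have h1 : ((n : Int) + 1 - 2).toNat = n - 1 := by omega
  rw [h1]
  have h2 : (List.range (n - 1)).map
        ((fun i => ((PySem.List.pyRange 0 ((n : Int) - i + 1) 1).countP
            (fun j => decide (((PySem.Set.ofList (PySem.List.slice l (some j) (some (j + i)))).length : Int) = i)) : Int))
          ∘ (fun k : Nat => (2 : Int) + k))
      = (List.range (n - 1)).map (fun k =>
          (((List.range (n - k - 1)).countP (fun m => decide (((l.drop m).take (k + 2)).Nodup)) : Nat) : Int)) := by
    apply List.map_congr_left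
    intro k hk
    rw [List.mem_range] at hk
    simp only [Function.comp]
    congr 1
    -- inner range: pyRange 0 (n - (2+k) + 1) 1 with casts
    rw [PySem.List.pyRange_one, List.countP_map]
    have h3 : ((n : Int) - (2 + (k : Int)) + 1 - 0).toNat = n - k - 1 := by omega
    rw [h3]
    apply List.countP_congr
    intro m hm
    rw [List.mem_range] at hm
    simp only [Function.comp, decide_eq_true_eq]
    have hslice : PySem.List.slice l (some ((0 : Int) + m)) (some (((0 : Int) + m) + (2 + (k : Int))))
        = (l.drop m).take (k + 2) := by
      have e1 : ((0 : Int) + m) = ((m : Nat) : Int) := by omega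
      have e2 : (2 + (k : Int)) = (((k + 2 : Nat)) : Int) := by omega
      rw [e1, e2, PySem.List.slice_natCast_add]
    rw [hslice]
    have hlen : ((l.drop m).take (k + 2)).length = k + 2 := by
      simp
      omega
    rw [← ofList_length_iff, hlen]
    omega
  rw [h2, sum_range_cast]
  have h4 : ∀ k ∈ Finset.range (n - 1),
      (List.range (n - k - 1)).countP (fun m => decide (((l.drop m).take (k + 2)).Nodup))
        = ((Finset.range (n - k - 1)).filter (fun m => ((l.drop m).take (k + 2)).Nodup)).card := by
    intro k _
    rw [countP_range]
    congr 1
    apply Finset.filter_congr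
    intro m _
    simp
  rw [Finset.sum_congr rfl h4]
  push_cast
  ring

-- ===== VERDICT (by name: the statement is the Claim_ definition above) =====
theorem findSubstrings_spec : Claim_equal_findSubstrings := by
  intro s _
  unfold Spec_findSubstrings
  rw [portA_eval, portB_eval, count_lemma]
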